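-- pv_equiv track=rewrite | github.com/tompickup23/newslancashire | scripts/api_optimizer.py | cluster_articles
-- ===== SOURCE A (Python) =====
-- from collections import defaultdict
--
-- def cluster_articles(articles):
--     """Group related articles by keywords to batch API calls"""
--     clusters = defaultdict(list)
--
--     for article in articles:
--         title = article['title'].lower()
--
--         # Extract key topics
--         if any(word in title for word in ['council', 'budget', 'meeting']):
--             clusters['council'].append(article)
--         elif any(word in title for word in ['burnley', 'fc', 'football', 'match']):
--             clusters['burnley_sport'].append(article)
--         elif any(word in title for word in ['police', 'crime', 'court', 'arrest']):
--             clusters['crime'].append(article)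
--         elif any(word in title for word in ['road', 'traffic', 'closure', 'a666']):
--             clusters['traffic'].append(article)
--         else:
--             clusters['general'].append(article)
--
--     return clusters
-- ===== SOURCE B (Python) =====
-- from collections import defaultdict
--
-- RULES = [
--     ('council', ('council', 'budget', 'meeting')),
--     ('burnley_sport', ('burnley', 'fc', 'football', 'match')),
--     ('crime', ('police', 'crime', 'court', 'arrest')),
--     ('traffic', ('road', 'traffic', 'closure', 'a666')),
-- ]
--
--
-- def _classify(article):
--     title = article['title'].lower()
--     matches = [name for name, words in RULES if any(w in title for w in words)]
--     return matches[0] if matches else 'general'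
--
--
-- def cluster_articles(articles):
--     """Group related articles by keywords to batch API calls"""
--     labels = [_classify(a) for a in articles]
--     order = list(dict.fromkeys(labels))
--     grouped = {k: [a for a, lab in zip(articles, labels) if lab == k] for k in order}
--     return defaultdict(list, grouped)
-- ===== Notes on version B (the rewrite author's own statement) =====
-- stated objective: alternative
-- what changed: Replaces A's online defaultdict-append loop with a staged group-by pipeline: one pass computes each article's label (by filtering a rule table for all matches and taking the head), dict.fromkeys dedups the labels into first-occurrence key order, and a dict comprehension builds each cluster by filtering the zipped article/label list.
import Mathlib
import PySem

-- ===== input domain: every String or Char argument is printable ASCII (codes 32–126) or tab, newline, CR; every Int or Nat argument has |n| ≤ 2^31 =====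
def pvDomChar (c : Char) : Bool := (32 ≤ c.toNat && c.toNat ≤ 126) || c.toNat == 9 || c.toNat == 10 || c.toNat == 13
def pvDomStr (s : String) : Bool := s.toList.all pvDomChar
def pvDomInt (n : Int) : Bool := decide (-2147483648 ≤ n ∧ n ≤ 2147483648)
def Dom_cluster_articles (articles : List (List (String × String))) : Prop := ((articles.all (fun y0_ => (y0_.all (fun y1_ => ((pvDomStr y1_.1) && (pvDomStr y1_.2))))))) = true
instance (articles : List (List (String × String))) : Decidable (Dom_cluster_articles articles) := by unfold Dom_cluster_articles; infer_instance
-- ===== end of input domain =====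

-- B replaces A's online defaultdict-append loop with a staged group-by pipeline
-- (label pass, first-occurrence key dedup, per-key filter); objective: alternative.
-- ===== PORT A =====
-- shared by both ports: title = article['title'].lower(), and any(word in title for word in words)
def pvTitle (article : List (String × String)) : String :=
  PySem.Str.lower (((PySem.Dict.mk article).get? "title").getD "")

def pvAnyIn (words : List String) (title : String) : Bool :=
  words.any (fun w => PySem.Str.isIn w title)

-- A's loop step: lower the title, then run the if/elif keyword chain, appending into the defaultdict.
def pvStepA (clusters : PySem.Dict String (List (List (String × String))))
    (article : List (String × String)) : PySem.Dict String (List (List (String × String))) :=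
  let title := pvTitle article
  if pvAnyIn ["council", "budget", "meeting"] title then
    clusters.modify "council" [] (fun l => l ++ [article])
  else if pvAnyIn ["burnley", "fc", "football", "match"] title then
    clusters.modify "burnley_sport" [] (fun l => l ++ [article])
  else if pvAnyIn ["police", "crime", "court", "arrest"] title then
    clusters.modify "crime" [] (fun l => l ++ [article])
  else if pvAnyIn ["road", "traffic", "closure", "a666"] title then
    clusters.modify "traffic" [] (fun l => l ++ [article])
  else
    clusters.modify "general" [] (fun l => l ++ [article])

def cluster_articles (articles : List (List (String × String))) : List (String × List (List (String × String))) :=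
  (articles.foldl pvStepA (PySem.Dict.mk [])).items

-- ===== PORT B =====
def pvRules : List (String × List String) :=
  [("council", ["council", "budget", "meeting"]),
   ("burnley_sport", ["burnley", "fc", "football", "match"]),
   ("crime", ["police", "crime", "court", "arrest"]),
   ("traffic", ["road", "traffic", "closure", "a666"])]

-- Source B's _classify: collect ALL matching rule names, take the first, else 'general'.
def pvClassify (article : List (String × String)) : String :=
  let title := pvTitle article
  let ms := (pvRules.filter (fun r => pvAnyIn r.2 title)).map (fun r => r.1)
  match ms with
  | m :: _ => m
  | [] => "general"

-- Source B's pipeline: labels; order = list(dict.fromkeys(labels)) (first-occurrence dedup,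
-- ported as PySem.Set.ofList); one filtered comprehension per key over zip(articles, labels).
def cluster_articles_alt (articles : List (List (String × String))) : List (String × List (List (String × String))) :=
  let labels := articles.map pvClassify
  let order := PySem.Set.ofList labels
  order.map (fun k => (k, ((articles.zip labels).filter (fun p => p.2 == k)).map (fun p => p.1)))

-- ===== PRECONDITION & SPEC =====
-- Pre_ excludes articles without a 'title' key, on which the Python A raises KeyError (B raises there too).
def Pre_cluster_articles (articles : List (List (String × String))) : Prop :=
  (articles.all (fun a => (PySem.Dict.mk a).contains "title") = true)
instance (articles : List (List (String × String))) : Decidable (Pre_cluster_articles articles) := by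
  unfold Pre_cluster_articles; infer_instance

def pvWitness_cluster_articles : (List (List (String × String))) :=
  [[("title", "Council budget row")], [("title", "Burnley FC win")], [("title", "weather")]]

def Spec_cluster_articles (articles : List (List (String × String))) (out : List (String × List (List (String × String)))) : Prop := out = cluster_articles_alt articles
instance (articles : List (List (String × String))) (out : List (String × List (List (String × String)))) : Decidable (Spec_cluster_articles articles out) := by unfold Spec_cluster_articles; infer_instance

-- ===== CLAIM (what is proved, stated in full; the proofs are below) =====
def Claim_equal_cluster_articles : Prop := ∀ (articles : List (List (String × String))), Dom_cluster_articles articles → Pre_cluster_articles articles → Spec_cluster_articles articles (cluster_articles articles)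

-- ===== LEMMAS AND PROOFS =====

-- A's if/elif chain picks exactly the label B's filter-then-head rule scan picks.
theorem pvStep_eq (clusters : PySem.Dict String (List (List (String × String))))
    (article : List (String × String)) :
    pvStepA clusters article = clusters.modify (pvClassify article) [] (fun l => l ++ [article]) := by
  unfold pvStepA pvClassify pvRules
  cases h1 : pvAnyIn ["council", "budget", "meeting"] (pvTitle article) <;>
  cases h2 : pvAnyIn ["burnley", "fc", "football", "match"] (pvTitle article) <;>
  cases h3 : pvAnyIn ["police", "crime", "court", "arrest"] (pvTitle article) <;>
  cases h4 : pvAnyIn ["road", "traffic", "closure", "a666"] (pvTitle article) <;>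
  simp [List.filter, h1, h2, h3, h4]

-- zip l (l.map f) pairs each element with its image.
theorem pvZip_map {α β : Type} (f : α → β) (l : List α) :
    l.zip (l.map f) = l.map (fun a => (a, f a)) := by
  induction l with
  | nil => rfl
  | cons a t ih => simp [ih]

-- the cluster A's fold leaves at key k, for any starting dict
theorem pvGetD_fold_gen (articles : List (List (String × String)))
    (d : PySem.Dict String (List (List (String × String)))) (k : String) :
    (articles.foldl (fun d a => d.modify (pvClassify a) [] (fun l => l ++ [a])) d).getD k []
      = d.getD k [] ++ (articles.filter (fun a => pvClassify a == k)) := by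
  induction articles generalizing d with
  | nil => simp
  | cons a t ih =>
      rw [List.foldl_cons, ih, PySem.Dict.getD_modify, List.filter_cons]
      by_cases h : k = pvClassify a
      · simp [h, List.append_assoc]
      · simp [h, Ne.symm h]

-- the value A's fold leaves at key k is the filtered cluster B computes for k
theorem pvGetD_fold (articles : List (List (String × String))) (k : String) :
    (articles.foldl (fun d a => d.modify (pvClassify a) [] (fun l => l ++ [a]))
        (PySem.Dict.mk [])).getD k []
      = ((articles.zip (articles.map pvClassify)).filter (fun p => p.2 == k)).map (fun p => p.1) := by
  rw [pvGetD_fold_gen, pvZip_map]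
  simp [List.filter_map, Function.comp_def, PySem.Dict.getD, PySem.Dict.get?]

-- A's fold rewritten with the label function, for any starting dict.
theorem pvFold_eq (articles : List (List (String × String)))
    (d : PySem.Dict String (List (List (String × String)))) :
    articles.foldl pvStepA d =
      articles.foldl (fun d a => d.modify (pvClassify a) [] (fun l => l ++ [a])) d := by
  induction articles generalizing d with
  | nil => rfl
  | cons a t ih => rw [List.foldl_cons, List.foldl_cons, pvStep_eq, ih]

-- ===== VERDICT (by name: the statement is the Claim_ definition above) =====
theorem cluster_articles_spec : Claim_equal_cluster_articles := by
  intro articles _ _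
  unfold Spec_cluster_articles cluster_articles cluster_articles_alt
  rw [pvFold_eq]
  have hnd : (articles.foldl (fun d a => d.modify (pvClassify a) [] (fun l => l ++ [a]))
      (PySem.Dict.mk ([] : List (String × List (List (String × String)))))).keys.Nodup := by
    exact PySem.Dict.nodup_keys_foldl_modify_key articles pvClassify [] (fun _ a l => l ++ [a]) _ (by simp [PySem.Dict.keys])
  rw [PySem.Dict.items_eq_map_keys _ hnd []]
  rw [PySem.Dict.keys_foldl_modify_key]
  have hkeys : PySem.Set.update (PySem.Dict.mk ([] : List (String × List (List (String × String))))).keys (articles.map pvClassify)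
      = PySem.Set.ofList (articles.map pvClassify) := by
    simp [PySem.Dict.keys, PySem.Set.update_nil_left]
  rw [hkeys]
  exact List.map_congr_left (fun k _ => by rw [pvGetD_fold])
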